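-- pv_equiv track=rewrite | github.com/wyg129642/trading_agent | crawl/crawler_monitor.py | _source_args_clean
-- ===== SOURCE A (Python) =====
-- def _source_args_clean(cfg: dict) -> list[str]:
--     """剥离 cfg["args"] 里 mode_args/ALL_SCRAPERS extra 会覆盖的参数.
--     保留源自定义参数 (如 gangtise 的 --skip-pdf). 拼接 mode args + extra 时避免重复.
--
--     所有反爬旋钮 (--throttle-*, --burst-*, --daily-cap) 现在统一由 mode_args
--     决定 — 历史的 cfg["args"] 里若残留这些, 一并剥掉以避免双重覆盖出错."""
--     out = []
--     drop = {"--watch", "--resume", "--since-hours", "--interval",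
--             "--throttle-base", "--throttle-jitter",
--             "--burst-size", "--burst-cooldown-min", "--burst-cooldown-max",
--             "--daily-cap", "--account-budget", "--idle-window-prob",
--             "--category", "--type", "--reports"}
--     drop_pair = {"--since-hours", "--interval",
--                  "--throttle-base", "--throttle-jitter",
--                  "--burst-size", "--burst-cooldown-min", "--burst-cooldown-max",
--                  "--daily-cap", "--account-budget", "--idle-window-prob",
--                  "--category", "--type"}  # 这些带值; --reports 是 flag 不带值
--     args = list(cfg["args"])
--     i = 0
--     while i < len(args):
--         a = args[i]
--         if a in drop:
--             if a in drop_pair and i + 1 < len(args):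
--                 i += 2
--             else:
--                 i += 1
--             continue
--         out.append(a)
--         i += 1
--     return out
-- ===== SOURCE B (Python) =====
-- def _source_args_clean(cfg: dict) -> list[str]:
--     """Two-stage closed form: precompute run lengths of consecutive value-bearing
--     flags, then filter by parity (a token is consumed as a value iff the run of
--     drop_pair flags immediately before it has odd length)."""
--     drop = {"--watch", "--resume", "--since-hours", "--interval",
--             "--throttle-base", "--throttle-jitter",
--             "--burst-size", "--burst-cooldown-min", "--burst-cooldown-max",
--             "--daily-cap", "--account-budget", "--idle-window-prob",
--             "--category", "--type", "--reports"}
--     drop_pair = {"--since-hours", "--interval",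
--                  "--throttle-base", "--throttle-jitter",
--                  "--burst-size", "--burst-cooldown-min", "--burst-cooldown-max",
--                  "--daily-cap", "--account-budget", "--idle-window-prob",
--                  "--category", "--type"}
--     args = list(cfg["args"])
--     pair_run = [0]
--     for a in args:
--         pair_run.append(pair_run[-1] + 1 if a in drop_pair else 0)
--     return [a for i, a in enumerate(args)
--             if a not in drop and pair_run[i] % 2 == 0]
-- ===== Notes on version B (the rewrite author's own statement) =====
-- stated objective: alternative
-- what changed: Replaces A's stateful consume-the-next-token scan by a two-stage closed form: a first pass precomputes the run length of consecutive value-bearing flags before each position, then a filter keeps a token iff it is not a drop flag and that run length is even (the parity characterization of which tokens the consume chain eats).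
import Mathlib
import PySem

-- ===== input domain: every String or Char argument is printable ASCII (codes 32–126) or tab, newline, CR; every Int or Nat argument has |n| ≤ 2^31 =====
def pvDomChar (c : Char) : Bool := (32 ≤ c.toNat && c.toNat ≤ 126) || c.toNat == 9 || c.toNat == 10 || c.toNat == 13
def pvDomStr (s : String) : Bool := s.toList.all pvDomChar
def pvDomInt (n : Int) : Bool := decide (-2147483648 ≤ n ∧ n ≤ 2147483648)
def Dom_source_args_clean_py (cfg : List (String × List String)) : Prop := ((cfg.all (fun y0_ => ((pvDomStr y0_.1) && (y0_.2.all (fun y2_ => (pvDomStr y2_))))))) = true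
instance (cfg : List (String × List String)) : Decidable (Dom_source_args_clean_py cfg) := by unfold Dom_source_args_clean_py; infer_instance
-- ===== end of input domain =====

-- B replaces A's stateful consume-the-next-token index scan by a two-stage closed form:
-- precompute runs of consecutive value-bearing flags, then filter by run-length parity.


-- ===== PORT A =====
-- the two literal sets from A (Python set of strings → distinct-element list)
def pvDrop : List String :=
  ["--watch", "--resume", "--since-hours", "--interval",
   "--throttle-base", "--throttle-jitter",
   "--burst-size", "--burst-cooldown-min", "--burst-cooldown-max",
   "--daily-cap", "--account-budget", "--idle-window-prob",
   "--category", "--type", "--reports"]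
def pvDropPair : List String :=
  ["--since-hours", "--interval",
   "--throttle-base", "--throttle-jitter",
   "--burst-size", "--burst-cooldown-min", "--burst-cooldown-max",
   "--daily-cap", "--account-budget", "--idle-window-prob",
   "--category", "--type"]

-- A's while loop over args with index i: i only advances, by 2 when a value-bearing flag
-- still has a following value (i + 1 < len(args), i.e. rest ≠ []), else by 1.
def pvLoopA : List String → List String
  | [] => []
  | a :: rest =>
    if a ∈ pvDrop then
      if a ∈ pvDropPair ∧ rest ≠ [] then pvLoopA rest.tail else pvLoopA rest
    else a :: pvLoopA rest
termination_by l => l.length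
decreasing_by all_goals simp [List.length_tail]

def source_args_clean_py (cfg : List (String × List String)) : List String :=
  match (PySem.Dict.mk cfg).get? "args" with
  | some args => pvLoopA args
  | none => []   -- KeyError in Python; excluded by Pre_

-- ===== PORT B =====
-- pair_run in Source B: pair_run[i] = length of the run of consecutive drop_pair flags
-- ending right before position i; built left to right carrying the current run length.
def pvRunArr : List String → Nat → List Nat
  | [], _ => []
  | a :: rest, r => r :: pvRunArr rest (if a ∈ pvDropPair then r + 1 else 0)

def source_args_clean_py_alt (cfg : List (String × List String)) : List String :=
  match (PySem.Dict.mk cfg).get? "args" with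
  | some args =>
      (args.zip (pvRunArr args 0)).filterMap
        (fun p => if p.1 ∉ pvDrop ∧ p.2 % 2 = 0 then some p.1 else none)
  | none => []   -- KeyError in Python; excluded by Pre_

-- ===== PRECONDITION & SPEC =====
-- Pre_ excludes exactly the cfg without an "args" key, where Python A raises KeyError.
def Pre_source_args_clean_py (cfg : List (String × List String)) : Prop :=
  ((PySem.Dict.mk cfg).get? "args").isSome = true
instance (cfg : List (String × List String)) : Decidable (Pre_source_args_clean_py cfg) := by
  unfold Pre_source_args_clean_py; infer_instance

def pvWitness_source_args_clean_py : (List (String × List String)) :=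
  [("args", ["--watch", "--since-hours", "6", "--skip-pdf"])]

def Spec_source_args_clean_py (cfg : List (String × List String)) (out : List String) : Prop := out = source_args_clean_py_alt cfg
instance (cfg : List (String × List String)) (out : List String) : Decidable (Spec_source_args_clean_py cfg out) := by unfold Spec_source_args_clean_py; infer_instance

-- ===== CLAIM (what is proved, stated in full; the proofs are below) =====
def Claim_equal_source_args_clean_py : Prop := ∀ (cfg : List (String × List String)), Dom_source_args_clean_py cfg → Pre_source_args_clean_py cfg → Spec_source_args_clean_py cfg (source_args_clean_py cfg)

-- ===== LEMMAS AND PROOFS =====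

-- g: structural form of B's zip/filterMap computation, carrying the current run length
def pvG : List String → Nat → List String
  | [], _ => []
  | a :: rest, r =>
    (if a ∉ pvDrop ∧ r % 2 = 0 then [a] else []) ++
      pvG rest (if a ∈ pvDropPair then r + 1 else 0)

theorem pvG_eq_zipFilter (args : List String) : ∀ r : Nat,
    (args.zip (pvRunArr args r)).filterMap
      (fun p => if p.1 ∉ pvDrop ∧ p.2 % 2 = 0 then some p.1 else none) = pvG args r := by
  induction args with
  | nil => intro r; simp [pvRunArr, pvG]
  | cons a rest ih =>
    intro r
    simp only [pvRunArr, List.zip_cons_cons, List.filterMap_cons, pvG]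
    by_cases h : a ∉ pvDrop ∧ r % 2 = 0 <;> simp [h, ih]

-- only the parity of the carried run matters
theorem pvG_parity (args : List String) : ∀ r s : Nat, r % 2 = s % 2 →
    pvG args r = pvG args s := by
  induction args with
  | nil => intro r s _; rfl
  | cons a rest ih =>
    intro r s h
    simp only [pvG, h]
    congr 1
    by_cases hp : a ∈ pvDropPair
    · simp only [hp, if_true]; exact ih _ _ (by omega)
    · simp [hp]

theorem pvPair_sub_drop : ∀ a : String, a ∈ pvDropPair → a ∈ pvDrop := by decide

-- core: A's consume-next scan equals B's parity-filter, started at even run length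
theorem pvLoopA_eq_pvG (n : Nat) : ∀ args : List String, args.length ≤ n →
    pvLoopA args = pvG args 0 := by
  induction n with
  | zero =>
    intro args h
    have : args = [] := List.eq_nil_of_length_eq_zero (Nat.le_zero.mp h)
    simp [this, pvLoopA, pvG]
  | succ n ih =>
    intro args h
    match args with
    | [] => simp [pvLoopA, pvG]
    | a :: rest =>
      simp only [List.length_cons, Nat.succ_le_succ_iff] at h
      by_cases hd : a ∈ pvDrop
      · by_cases hp : a ∈ pvDropPair
        · match rest with
          | [] =>
            rw [pvLoopA]
            simp only [hp, ne_eq, not_true, and_false, if_false, hd, if_pos]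
            rw [pvLoopA]
            simp [pvG, hd]
          | b :: t =>
            have ht : t.length ≤ n := by simp at h; omega
            rw [pvLoopA]
            simp only [hd, if_pos, hp, true_and, ne_eq, reduceCtorEq, not_false_iff,
              List.tail_cons]
            rw [pvG]
            simp only [hd, not_true, false_and, if_false, List.nil_append, hp, if_pos]
            rw [pvG]
            have hodd : ¬ ((0 + 1) % 2 = 0) := by omega
            by_cases hbd : b ∉ pvDrop ∧ (0 + 1) % 2 = 0
            · exact absurd hbd.2 hodd
            · simp only [hbd, if_false, List.nil_append]
              rw [ih t ht]
              by_cases hbp : b ∈ pvDropPair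
              · simp only [hbp, if_true]
                exact (pvG_parity t _ _ (by omega)).symm
              · simp [hbp]
        · rw [pvLoopA]
          simp only [hd, if_pos, hp, false_and, if_false]
          rw [pvG]
          simp only [hd, not_true, false_and, if_false, List.nil_append, hp]
          exact ih rest h
      · rw [pvLoopA]
        simp only [hd, if_false]
        rw [pvG]
        have hp : a ∉ pvDropPair := fun hc => hd (pvPair_sub_drop a hc)
        simp only [hd, not_false_iff, true_and, Nat.zero_mod, if_pos, hp, if_false,
          List.singleton_append]
        rw [ih rest h]

-- ===== VERDICT (by name: the statement is the Claim_ definition above) =====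
theorem source_args_clean_py_spec : Claim_equal_source_args_clean_py := by
  intro cfg _ _
  unfold Spec_source_args_clean_py source_args_clean_py source_args_clean_py_alt
  cases hg : (PySem.Dict.mk cfg).get? "args" with
  | none => rfl
  | some args =>
    simp only []
    rw [pvG_eq_zipFilter]
    exact pvLoopA_eq_pvG args.length args le_rfl
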